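-- pv_equiv track=rewrite | github.com/Atramekes/Algorithms | Recursion/Baguenaudier.py | Baguenaudier
-- ===== SOURCE A (Python) =====
-- def flip(seq, func):
--     """ Process a one-zero sequence seq according to func.
--         @param seq (list[int]): the unprocessed sequence
--         @param func (int): to do which function
--         @returns processed_seq (list[int]): the processed sequence
--     """
--     ### TODO - calculate the processed_seq according to func
--     ### YOUR CODE HERE (optional)
--     processed_seq = seq.copy()
--     if func == 0:
--         processed_seq[-1] = 1 - seq[-1]
--         index = 1
--     else:
--         n = 0
--         for i in range(len(seq)-1, 0, -1):
--             if seq[i] != 0: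
--                 break
--             n += 1
--         if n + 2 <= len(seq):
--             processed_seq[-n-2] = 1 - seq[-n-2]
--             index = n + 2
--     ### END YOUR CODE
--     return processed_seq, index
--
-- def reversed_B(n):
--     if n == 1:
--         return [0]
--     elif n == 2:
--         return [0,1]
--     ans = []
--     ans += reversed_B(n-1)
--     ans += B(n-2)
--     ans.append(1)
--     ans += reversed_B(n-2)
--     return ans
--
-- def B(n):
--     if n == 1:
--         return [0]
--     elif n == 2:
--         return [1,0]
--     seq = n*[1]
--     ans = []
--     ans += B(n-2)
--     ans.append(1)
--     ans += reversed_B(n-2)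
--     ans += B(n-1)
--     return ans
--
-- def Baguenaudier(n):
--     """ Solve Baguenaudier problem.
--         @params n (int): dimension of the problem
--         @returns solution (list[int]): the list of functions to solve the problem
--     """
--
--     ### TODO - finish the function to Baguenaudier Hanoi problem
--     ### YOUR CODE HERE
--     ans = B(n)
--     s = n * [1]
--     solution = []
--     for i in ans:
--         s, index = flip(s, i)
--         solution.append(index)
--     ### END YOUR CODE
--     return solution
-- ===== SOURCE B (Python) =====
-- def Baguenaudier(n):
--     """ Solve Baguenaudier problem.
--         @params n (int): dimension of the problem
--         @returns solution (list[int]): the list of functions to solve the problem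
--     """
--     # The k-th move counted from the END of the solution (k = 1 .. 2^(n+1)//3)
--     # moves ring v2(k)+1, where v2 is the 2-adic valuation; so emit the ruler
--     # sequence for k = L down to 1 directly, no state simulation needed.
--     L = 2 ** (n + 1) // 3
--     solution = []
--     for k in range(L, 0, -1):
--         j, r = 1, k
--         while r % 2 == 0:
--             j += 1
--             r //= 2
--         solution.append(j)
--     return solution
-- ===== Notes on version B (the rewrite author's own statement) =====
-- stated objective: faster
-- what changed: Replaces the doubly-recursive move-flag generator B/reversed_B plus a per-move state simulation that rescans the ring state with a direct emission of the ruler sequence: move k counted from the end of the solution is ring v2(k)+1, so one loop over k = 2^(n+1)//3 down to 1 produces the answer.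
import Mathlib
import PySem

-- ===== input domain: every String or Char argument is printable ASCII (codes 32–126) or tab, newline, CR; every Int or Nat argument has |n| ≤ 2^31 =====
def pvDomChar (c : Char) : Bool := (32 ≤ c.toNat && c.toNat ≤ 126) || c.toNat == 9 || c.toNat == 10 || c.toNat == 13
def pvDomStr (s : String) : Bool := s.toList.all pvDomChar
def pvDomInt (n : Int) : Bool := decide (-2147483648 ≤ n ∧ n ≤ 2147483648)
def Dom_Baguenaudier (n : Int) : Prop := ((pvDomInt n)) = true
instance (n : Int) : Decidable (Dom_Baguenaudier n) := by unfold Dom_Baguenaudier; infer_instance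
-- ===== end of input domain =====

-- B replaces A's doubly-recursive flag generator + per-move state rescans by directly
-- emitting the ruler sequence (move k from the end is ring v2(k)+1); objective: faster.


-- ===== PORT A =====
-- mutual recursion B / reversed_B; the `| 0 => []` bases are termination guards only:
-- Python recurses forever (RecursionError) for n ≤ 0, which Pre_ excludes.
mutual
def pyB : Nat → List Int
  | 0 => []
  | 1 => [0]
  | 2 => [1, 0]
  | (n+3) => pyB (n+1) ++ [1] ++ pyRevB (n+1) ++ pyB (n+2)
def pyRevB : Nat → List Int
  | 0 => []
  | 1 => [0]
  | 2 => [0, 1]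
  | (n+3) => pyRevB (n+2) ++ pyB (n+1) ++ [1] ++ pyRevB (n+1)
end

-- the `for i in range(len(seq)-1, 0, -1): if seq[i] != 0: break; n += 1` loop of flip,
-- scanning index i downward (indices are in range, so List.getD is exact here)
def flipLoop (seq : List Int) : Nat → Nat → Nat
  | 0, acc => acc
  | (i+1), acc => if seq.getD (i+1) 0 ≠ 0 then acc else flipLoop seq i (acc + 1)

-- flip(seq, func); negative Python indices -1 / -n-2 rewritten as length-1 / length-n-2
-- (always in range under Pre_). In the `else` fall-through Python's `index` is unbound
-- (UnboundLocalError) — unreachable under Pre_; we return (seq, 0) there.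
def pyFlipElse (seq : List Int) (nz : Nat) : List Int × Int :=
  if nz + 2 ≤ seq.length then
    (seq.set (seq.length - (nz + 2)) (1 - seq.getD (seq.length - (nz + 2)) 0), (nz : Int) + 2)
  else
    (seq, 0)

def pyFlip (seq : List Int) (func : Int) : List Int × Int :=
  if func = 0 then
    (seq.set (seq.length - 1) (1 - seq.getD (seq.length - 1) 0), 1)
  else
    pyFlipElse seq (flipLoop seq (seq.length - 1) 0)

-- the `for i in ans: s, index = flip(s, i); solution.append(index)` loop
def simLoop (s : List Int) : List Int → List Int
  | [] => []
  | f :: rest => (pyFlip s f).2 :: simLoop (pyFlip s f).1 rest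

def Baguenaudier (n : Int) : List Int :=
  simLoop (List.replicate n.toNat 1) (pyB n.toNat)

-- ===== PORT B =====
-- the `j, r = 1, k; while r % 2 == 0: j += 1; r //= 2` loop; the fuel argument and its
-- `0 < r` guard only make the recursion total (in B, r ≥ 1 always, and r halves each step)
def ringsGo : Nat → Int → Int → Int
  | 0, j, _ => j
  | (fuel+1), j, r =>
    if PySem.Int.mod r 2 = 0 ∧ 0 < r then ringsGo fuel (j + 1) (PySem.Int.floordiv r 2) else j

def rings (j r : Int) : Int := ringsGo r.toNat j r

def Baguenaudier_alt (n : Int) : List Int :=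
  let L : Int := PySem.Int.floordiv (2 ^ (n + 1).toNat) 3
  (PySem.List.pyRange L 0 (-1)).map (fun k => rings 1 k)

-- ===== PRECONDITION & SPEC =====
-- Pre_ excludes exactly n ≤ 0, where Python's B/reversed_B recurse forever (RecursionError).
def Pre_Baguenaudier (n : Int) : Prop := 1 ≤ n
instance (n : Int) : Decidable (Pre_Baguenaudier n) := by unfold Pre_Baguenaudier; infer_instance
def pvWitness_Baguenaudier : Int := 50000

def Spec_Baguenaudier (n : Int) (out : List Int) : Prop := out = Baguenaudier_alt n
instance (n : Int) (out : List Int) : Decidable (Spec_Baguenaudier n out) := by unfold Spec_Baguenaudier; infer_instance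

-- ===== CLAIM (what is proved, stated in full; the proofs are below) =====
def Claim_equal_Baguenaudier : Prop := ∀ (n : Int), Dom_Baguenaudier n → Pre_Baguenaudier n → Spec_Baguenaudier n (Baguenaudier n)

-- ===== LEMMAS AND PROOFS =====

-- L n = 2^(n+1)//3, the length of the solution, by its Fibonacci-style recurrence
def Lr : Nat → Nat
  | 0 => 0
  | 1 => 1
  | (n+2) => 2 * Lr n + 1 + Lr (n+1)

-- the flag list of length m whose entry at distance d from the END (d = m-i) is 0 iff d is odd
def pat : Nat → List Int
  | 0 => []
  | (m+1) => (if (m+1) % 2 = 1 then (0:Int) else 1) :: pat m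

-- Gray code of m on n bits, least-significant bit FIRST (bit of g(m) = m xor m>>1)
def gl : Nat → Nat → List Int
  | 0, _ => []
  | (n+1), m => (((m % 2 + m / 2 % 2) % 2 : Nat) : Int) :: gl n (m / 2)

-- the intended output, built from the END: move k from the end is rings 1 k
def outL : Nat → List Int
  | 0 => []
  | (m+1) => rings 1 ((m:Int)+1) :: outL m

-- trailing zero count (2-adic valuation)
def tz : Nat → Nat
  | 0 => 0
  | (m+1) => if (m+1) % 2 = 1 then 0 else tz ((m+1)/2) + 1
decreasing_by simp_wf; omega

theorem Lr_key : ∀ n, 3 * Lr n + 2 = 2 ^ (n+1) + n % 2 := by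
  intro n
  induction n using Nat.strong_induction_on with
  | _ n ih =>
    match n with
    | 0 => decide
    | 1 => decide
    | (k+2) =>
      have h1 := ih k (by omega)
      have h2 := ih (k+1) (by omega)
      have p1 : (2:Nat) ^ (k+3) = 2 * 2 ^ (k+2) := by ring
      have p2 : (2:Nat) ^ (k+2) = 2 * 2 ^ (k+1) := by ring
      simp only [Lr]
      omega


theorem Lr_parity (n : Nat) : Lr n % 2 = n % 2 := by
  have h := Lr_key n
  have : (2:Nat) ^ (n+1) = 2 * 2 ^ n := by ring
  omega


theorem Lr_half (n : Nat) : Lr (n+1) / 2 = Lr n := by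
  have h1 := Lr_key n
  have h2 := Lr_key (n+1)
  have : (2:Nat) ^ (n+2) = 2 * 2 ^ (n+1) := by ring
  omega


theorem Lr_lt (n : Nat) : Lr n < 2 ^ n := by
  have h := Lr_key n
  have : (2:Nat) ^ (n+1) = 2 * 2 ^ n := by ring
  have hp : 1 ≤ (2:Nat) ^ n := Nat.one_le_two_pow
  omega


theorem pat_append (x : Nat) : ∀ y, (x + y) % 2 = 1 →
    pat x ++ 1 :: ((pat x).reverse ++ pat y) = pat (2*x + 1 + y) := by
  induction x with
  | zero =>
    intro y h
    have hy : (y+1) % 2 = 0 := by omega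
    show [] ++ 1 :: ([] ++ pat y) = pat (0 + 1 + y)
    have : 0 + 1 + y = y + 1 := by omega
    rw [this, pat, hy]
    simp
  | succ x ih =>
    intro y h
    have hpar : (x + (y+1)) % 2 = 1 := by omega
    have hc : ((x+1) % 2 = 1) = ((y+1) % 2 = 1) := by
      by_cases hx : (x+1) % 2 = 1 <;> simp [hx] <;> omega
    have h3 : (2*x + 1 + (y + 1)) = 2*(x+1) + 1 + y - 1 := by omega
    have h4 : 2*(x+1) + 1 + y = (2*x + 1 + (y+1)) + 1 := by omega
    have hc2 : ((2*(x+1) + 1 + y) % 2 = 1) = ((x+1) % 2 = 1) := by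
      by_cases hx : (x+1) % 2 = 1 <;> simp [hx] <;> omega
    calc pat (x+1) ++ 1 :: ((pat (x+1)).reverse ++ pat y)
        = (if (x+1) % 2 = 1 then (0:Int) else 1) ::
          (pat x ++ 1 :: ((pat x).reverse ++ ((if (y+1) % 2 = 1 then (0:Int) else 1) :: pat y))) := by
          simp [pat, hc]
      _ = (if (x+1) % 2 = 1 then (0:Int) else 1) ::
          (pat x ++ 1 :: ((pat x).reverse ++ pat (y+1))) := by rw [pat]
      _ = (if (x+1) % 2 = 1 then (0:Int) else 1) :: pat (2*x + 1 + (y+1)) := by rw [ih (y+1) hpar]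
      _ = pat (2*(x+1) + 1 + y) := by
          rw [h4, pat]
          by_cases hx : (x+1) % 2 = 1
          · have hz : (2*x + 1 + (y+1) + 1) % 2 = 1 := by omega
            simp [hx, hz]
          · have hz : (2*x + 1 + (y+1) + 1) % 2 = 0 := by omega
            have hx0 : (x+1) % 2 = 0 := by omega
            simp [hx0, hz]


theorem B_pat : ∀ n, 1 ≤ n → pyB n = pat (Lr n) ∧ pyRevB n = (pat (Lr n)).reverse := by
  intro n
  induction n using Nat.strong_induction_on with
  | _ n ih =>
    intro hn
    match n with
    | 1 => exact ⟨by decide, by decide⟩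
    | 2 => exact ⟨by decide, by decide⟩
    | (k+3) =>
      obtain ⟨ha1, ha2⟩ := ih (k+1) (by omega) (by omega)
      obtain ⟨hb1, hb2⟩ := ih (k+2) (by omega) (by omega)
      have hpar : (Lr (k+1) + Lr (k+2)) % 2 = 1 := by
        have p1 := Lr_parity (k+1)
        have p2 := Lr_parity (k+2)
        omega
      have key := pat_append (Lr (k+1)) (Lr (k+2)) hpar
      have hL : Lr (k+3) = 2 * Lr (k+1) + 1 + Lr (k+2) := by rw [Lr]
      constructor
      · show pyB (k+1) ++ [1] ++ pyRevB (k+1) ++ pyB (k+2) = _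
        rw [ha1, ha2, hb1, hL, ← key]
        simp
      · show pyRevB (k+2) ++ pyB (k+1) ++ [1] ++ pyRevB (k+1) = _
        rw [ha1, ha2, hb2, hL, ← key]
        simp [List.reverse_append]


theorem gl_length (n : Nat) : ∀ m, (gl n m).length = n := by
  induction n with
  | zero => intro m; rfl
  | succ k ih => intro m; simp [gl, ih]

theorem gl_ones : ∀ n, gl n (Lr n) = List.replicate n 1 := by
  intro n
  induction n with
  | zero => rfl
  | succ k ih =>
    have hh := Lr_half k
    have hp1 := Lr_parity k
    have hp2 := Lr_parity (k+1)
    show (((Lr (k+1) % 2 + Lr (k+1) / 2 % 2) % 2 : Nat) : Int) :: gl k (Lr (k+1) / 2) = _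
    rw [hh, ih]
    have : (Lr (k+1) % 2 + Lr k % 2) % 2 = 1 := by omega
    rw [this]
    simp [List.replicate_succ]


theorem tz_odd (m : Nat) (ho : m % 2 = 1) : tz m = 0 := by
  obtain ⟨t, ht⟩ : ∃ t, m = t + 1 := ⟨m - 1, by omega⟩
  subst ht
  rw [tz, if_pos ho]

theorem tz_even (m : Nat) (h : 1 ≤ m) (he : m % 2 = 0) : tz m = tz (m/2) + 1 := by
  obtain ⟨t, ht⟩ : ∃ t, m = t + 1 := ⟨m - 1, by omega⟩
  subst ht
  rw [tz, if_neg (by omega)]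

theorem ringsGo_fuel : ∀ fuel (j r : Int), r.toNat ≤ fuel → ringsGo fuel j r = rings j r := by
  intro fuel
  induction fuel using Nat.strong_induction_on with
  | _ fuel ih =>
    intro j r h
    match fuel with
    | 0 =>
      have h0 : r.toNat = 0 := by omega
      show ringsGo 0 j r = ringsGo r.toNat j r
      rw [h0]
    | (f+1) =>
      by_cases hc : PySem.Int.mod r 2 = 0 ∧ 0 < r
      · have hr1 : 1 ≤ r.toNat := by omega
        have hrc : r = ((r.toNat : Nat) : Int) := by omega
        have hfd : PySem.Int.floordiv r 2 = ((r.toNat / 2 : Nat) : Int) := by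
          rw [hrc]; exact PySem.Int.floordiv_natCast r.toNat 2
        have hft : (PySem.Int.floordiv r 2).toNat = r.toNat / 2 := by rw [hfd]; omega
        have step1 : ringsGo (f+1) j r = ringsGo f (j+1) (PySem.Int.floordiv r 2) := by
          show (if PySem.Int.mod r 2 = 0 ∧ 0 < r then _ else j) = _
          rw [if_pos hc]
        have step2 : rings j r = ringsGo (r.toNat - 1) (j+1) (PySem.Int.floordiv r 2) := by
          show ringsGo r.toNat j r = _
          obtain ⟨t, ht⟩ : ∃ t, r.toNat = t + 1 := ⟨r.toNat - 1, by omega⟩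
          rw [ht]
          show (if PySem.Int.mod r 2 = 0 ∧ 0 < r then _ else j) = _
          rw [if_pos hc]
          exact rfl
        rw [step1, step2, ih f (by omega) _ _ (by omega), ih (r.toNat - 1) (by omega) _ _ (by omega)]
      · have step1 : ringsGo (f+1) j r = j := by
          show (if PySem.Int.mod r 2 = 0 ∧ 0 < r then _ else j) = j
          rw [if_neg hc]
        have step2 : rings j r = j := by
          show ringsGo r.toNat j r = j
          match hrt : r.toNat with
          | 0 => rfl
          | (t+1) =>
            show (if PySem.Int.mod r 2 = 0 ∧ 0 < r then _ else j) = j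
            rw [if_neg hc]
        rw [step1, step2]

theorem rings_step (j : Int) (m : Nat) (h : 1 ≤ m) :
    rings j (m : Int) = if m % 2 = 1 then j else rings (j+1) ((m/2 : Nat) : Int) := by
  obtain ⟨t, ht⟩ : ∃ t, m = t + 1 := ⟨m - 1, by omega⟩
  have htn : ((m : Int)).toNat = m := by omega
  show ringsGo ((m : Int)).toNat j (m : Int) = _
  rw [htn, ht]
  show (if PySem.Int.mod ((t+1 : Nat) : Int) 2 = 0 ∧ 0 < ((t+1 : Nat) : Int) then ringsGo t (j+1) (PySem.Int.floordiv ((t+1 : Nat) : Int) 2) else j) = _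
  have hmc : PySem.Int.mod (((t+1 : Nat)) : Int) 2 = (((t+1) % 2 : Nat) : Int) := by
    exact_mod_cast PySem.Int.mod_natCast (t+1) 2
  have hfc : PySem.Int.floordiv (((t+1 : Nat)) : Int) 2 = (((t+1) / 2 : Nat) : Int) := by
    exact_mod_cast PySem.Int.floordiv_natCast (t+1) 2
  rw [hmc, hfc]
  by_cases hm : m % 2 = 1
  · rw [if_neg (by rw [← ht]; simp; omega), if_pos (by omega)]
  · have hcond : ((((t+1) % 2 : Nat)) : Int) = 0 ∧ (0:Int) < (((t+1) : Nat) : Int) :=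
      ⟨by rw [← ht]; simp; omega, by exact_mod_cast Nat.succ_pos t⟩
    rw [if_pos hcond, if_neg (by omega)]
    rw [← ht]
    exact ringsGo_fuel t (j+1) _ (by omega)


theorem rings_tz : ∀ m : Nat, 1 ≤ m → ∀ j : Int, rings j (m : Int) = j + tz m := by
  intro m
  induction m using Nat.strong_induction_on with
  | _ m ih =>
    intro hm j
    by_cases hodd : m % 2 = 1
    · rw [rings_step j m hm, if_pos hodd, tz_odd m hodd]
      omega
    · have he : m % 2 = 0 := by omega
      rw [rings_step j m hm, if_neg hodd, ih (m/2) (by omega) (by omega) (j+1),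
        tz_even m hm he]
      push_cast
      ring


theorem tz_le : ∀ m : Nat, 1 ≤ m → 2 ^ tz m ≤ m := by
  intro m
  induction m using Nat.strong_induction_on with
  | _ m ih =>
    intro h
    by_cases hodd : m % 2 = 1
    · rw [tz_odd m hodd]; omega
    · rw [tz_even m h (by omega)]
      have h1 := ih (m/2) (by omega) (by omega)
      have h2 : 2 ^ (tz (m/2) + 1) = 2 * 2 ^ tz (m/2) := by ring
      omega




theorem flipLoop_acc (seq : List Int) : ∀ i acc, flipLoop seq i acc = acc + flipLoop seq i 0 := by
  intro i
  induction i with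
  | zero => intro acc; simp [flipLoop]
  | succ k ih =>
    intro acc
    show (if seq.getD (k+1) 0 ≠ 0 then acc else flipLoop seq k (acc+1)) =
      acc + (if seq.getD (k+1) 0 ≠ 0 then 0 else flipLoop seq k (0+1))
    split_ifs with hb
    · omega
    · rw [ih (acc+1), ih (0+1)]
      omega


theorem flipLoop_append (s : List Int) (c : Int) :
    ∀ i acc, i < s.length → flipLoop (s ++ [c]) i acc = flipLoop s i acc := by
  intro i
  induction i with
  | zero => intro acc _; rfl
  | succ k ih =>
    intro acc hk
    have hg : (s ++ [c]).getD (k+1) 0 = s.getD (k+1) 0 := by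
      rw [List.getD_eq_getElem?_getD, List.getD_eq_getElem?_getD, List.getElem?_append_left hk]
    show (if (s ++ [c]).getD (k+1) 0 ≠ 0 then acc else flipLoop (s ++ [c]) k (acc+1)) =
      (if s.getD (k+1) 0 ≠ 0 then acc else flipLoop s k (acc+1))
    rw [hg]
    split_ifs with hb
    · rfl
    · exact ih (acc+1) (by omega)


theorem reverse_set (l : List Int) (i : Nat) (v : Int) (h : i < l.length) :
    l.reverse.set i v = (l.set (l.length - 1 - i) v).reverse := by
  apply List.ext_getElem
  · simp
  · intro k h1 h2
    have hl : k < l.length := by simpa using h1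
    rw [List.getElem_set]
    conv_rhs => rw [List.getElem_reverse, List.getElem_set]
    simp only [List.length_set]
    by_cases hk : i = k
    · rw [if_pos hk, if_pos (by omega)]
    · rw [if_neg hk, if_neg (by omega), List.getElem_reverse]


theorem reverse_getD (l : List Int) (i : Nat) (h : i < l.length) :
    l.reverse.getD i 0 = l.getD (l.length - 1 - i) 0 := by
  rw [List.getD_eq_getElem _ _ (by simpa using h), List.getD_eq_getElem _ _ (by omega),
    List.getElem_reverse]


theorem EVloop : ∀ n a, 1 ≤ a → 2*a < 2^n →
    flipLoop ((gl n (2*a)).reverse) (n-1) 0 = tz a := by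
  intro n
  induction n with
  | zero => intro a h1 h2; exact absurd h2 (by simp; omega)
  | succ k ih =>
    intro a h1 h2
    have hbit : gl (k+1) (2*a) = (((a % 2 : Nat)) : Int) :: gl k a := by
      show ((((2*a) % 2 + (2*a) / 2 % 2) % 2 : Nat) : Int) :: gl k ((2*a) / 2) = _
      have ed : 2*a/2 = a := by omega
      rw [ed]
      have e5 : ((2*a) % 2 + a % 2) % 2 = a % 2 := by omega
      rw [e5]
    have hlenr : ((gl k a).reverse).length = k := by simp [gl_length]
    have hrev : (gl (k+1) (2*a)).reverse = (gl k a).reverse ++ [(((a % 2 : Nat)) : Int)] := by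
      rw [hbit]; simp
    have hlast : ((gl k a).reverse ++ [(((a % 2 : Nat)) : Int)]).getD k 0 = (((a % 2 : Nat)) : Int) := by
      rw [List.getD_eq_getElem?_getD, List.getElem?_append_right (by omega)]
      simp [hlenr]
    by_cases ha : a % 2 = 1
    · have hk1 : 1 ≤ k := by
        by_contra hk
        have : k = 0 := by omega
        subst this
        omega
      obtain ⟨k', hk'⟩ : ∃ k', k = k' + 1 := ⟨k - 1, by omega⟩
      subst hk'
      rw [hrev]
      show flipLoop _ (k'+1+1-1) 0 = tz a
      have e : k'+1+1-1 = k'+1 := by omega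
      rw [e]
      show (if ((gl (k'+1) a).reverse ++ [(((a % 2 : Nat)) : Int)]).getD (k'+1) 0 ≠ 0 then 0
        else flipLoop _ k' (0+1)) = tz a
      rw [hlast, tz_odd a ha, ha]
      simp
    · have he : a % 2 = 0 := by omega
      obtain ⟨b, hb⟩ : ∃ b, a = 2*b := ⟨a/2, by omega⟩
      subst hb
      have hk2 : 2 ≤ k := by
        by_contra hk
        interval_cases k <;> omega
      obtain ⟨k', hk'⟩ : ∃ k', k = k' + 1 := ⟨k - 1, by omega⟩
      subst hk'
      rw [hrev]
      show flipLoop _ (k'+1+1-1) 0 = tz (2*b)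
      have e : k'+1+1-1 = k'+1 := by omega
      rw [e]
      show (if ((gl (k'+1) (2*b)).reverse ++ [(((2*b % 2 : Nat)) : Int)]).getD (k'+1) 0 ≠ 0 then 0
        else flipLoop _ k' (0+1)) = tz (2*b)
      rw [hlast]
      have f0 : 2*b % 2 = 0 := by omega
      rw [f0]
      simp only [Nat.cast_zero, ne_eq, not_true_eq_false, if_false]
      rw [flipLoop_append _ _ k' (0+1) (by omega), flipLoop_acc _ k' (0+1)]
      have ihb := ih b (by omega) (by omega)
      simp only [Nat.add_sub_cancel] at ihb
      rw [ihb]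
      have htz : tz (2*b) = tz b + 1 := by
        have := tz_even (2*b) (by omega) (by omega)
        have ebb : 2*b/2 = b := by omega
        rwa [ebb] at this
      omega


theorem GSET : ∀ n a, 1 ≤ a → 2*a < 2^n →
    (gl n (2*a)).set (tz a + 1) (1 - (gl n (2*a)).getD (tz a + 1) 0) = gl n (2*a - 1) := by
  intro n
  induction n with
  | zero => intro a h1 h2; exact absurd h2 (by simp; omega)
  | succ k ih =>
    intro a h1 h2
    have ed : 2*a/2 = a := by omega
    have hbit : gl (k+1) (2*a) = (((a % 2 : Nat)) : Int) :: gl k a := by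
      show ((((2*a) % 2 + (2*a) / 2 % 2) % 2 : Nat) : Int) :: gl k ((2*a) / 2) = _
      rw [ed]
      have e5 : ((2*a) % 2 + a % 2) % 2 = a % 2 := by omega
      rw [e5]
    have et : (2*a - 1) / 2 = a - 1 := by omega
    have eb' : gl (k+1) (2*a - 1) = ((((1 + (a-1) % 2) % 2 : Nat)) : Int) :: gl k (a - 1) := by
      show ((((2*a-1) % 2 + (2*a-1) / 2 % 2) % 2 : Nat) : Int) :: gl k ((2*a-1) / 2) = _
      rw [et]
      have e6 : ((2*a-1) % 2 + (a-1) % 2) % 2 = (1 + (a-1) % 2) % 2 := by omega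
      rw [e6]
    by_cases ha : a % 2 = 1
    · -- a odd: tz a = 0, set position 1 inside gl k a
      have htz : tz a = 0 := tz_odd a ha
      have hk1 : 1 ≤ k := by
        by_contra hk
        have : k = 0 := by omega
        subst this
        omega
      obtain ⟨k', hk'⟩ : ∃ k', k = k' + 1 := ⟨k - 1, by omega⟩
      subst hk'
      have hga : gl (k'+1) a = ((((1 + a/2 % 2) % 2 : Nat)) : Int) :: gl k' (a / 2) := by
        show (((a % 2 + a / 2 % 2) % 2 : Nat) : Int) :: gl k' (a / 2) = _
        have e7 : (a % 2 + a/2 % 2) % 2 = (1 + a/2 % 2) % 2 := by omega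
        rw [e7]
      have hga' : gl (k'+1) (a - 1) = (((a/2 % 2 : Nat)) : Int) :: gl k' (a / 2) := by
        show ((((a-1) % 2 + (a-1) / 2 % 2) % 2 : Nat) : Int) :: gl k' ((a-1) / 2) = _
        have f1 : (a-1)/2 = a/2 := by omega
        rw [f1]
        have e8 : ((a-1) % 2 + a/2 % 2) % 2 = a/2 % 2 := by omega
        rw [e8]
      rw [hbit, eb', hga, hga', htz, ha]
      have f3 : (1 + (a-1) % 2) % 2 = 1 := by omega
      rw [f3]
      have hz : a / 2 % 2 = 0 ∨ a / 2 % 2 = 1 := by omega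
      rcases hz with hz | hz <;> simp [List.set, List.getD, hz]
    · -- a even: recurse
      have he : a % 2 = 0 := by omega
      obtain ⟨b, hb⟩ : ∃ b, a = 2*b := ⟨a/2, by omega⟩
      subst hb
      have htz : tz (2*b) = tz b + 1 := by
        have := tz_even (2*b) (by omega) (by omega)
        have ebb : 2*b/2 = b := by omega
        rwa [ebb] at this
      have f0 : (2*b) % 2 = 0 := by omega
      have f1 : (1 + (2*b - 1) % 2) % 2 = 0 := by omega
      rw [hbit, eb', f0, f1, htz]
      have ihb := ih b (by omega) (by omega)
      have hgd : ∀ (x : Int) (t : List Int) (i : Nat),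
          (x :: t).getD (i+1) 0 = t.getD i 0 := by intro x t i; simp [List.getD]
      have hset : ∀ (x : Int) (t : List Int) (i : Nat) (v : Int),
          (x :: t).set (i+1) v = x :: t.set i v := by intro x t i v; rfl
      rw [hgd, hset, ihb]


theorem EV (n a : Nat) (h1 : 1 ≤ a) (h2 : 2*a < 2^n) :
    pyFlip ((gl n (2*a)).reverse) 1 = ((gl n (2*a - 1)).reverse, rings 1 ((2*a : Nat) : Int)) := by
  have hn2 : 2 ≤ n := by
    by_contra hk
    interval_cases n <;> omega
  have hlen : ((gl n (2*a)).reverse).length = n := by simp [gl_length]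
  have hgl : (gl n (2*a)).length = n := gl_length n (2*a)
  have htza : tz a + 2 ≤ n := by
    have h3 := tz_le a h1
    have h4 : 2 ^ tz a < 2 ^ (n-1) := by
      have : (2:Nat) ^ n = 2 * 2 ^ (n-1) := by
        rw [← pow_succ']
        congr 1
        omega
      omega
    have h5 : tz a < n - 1 := by
      by_contra hge
      have : 2 ^ (n-1) ≤ 2 ^ tz a := Nat.pow_le_pow_right (by omega) (by omega)
      omega
    omega
  unfold pyFlip
  rw [if_neg (by norm_num), hlen]
  rw [EVloop n a h1 h2]
  unfold pyFlipElse
  rw [hlen, if_pos (by omega)]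
  have hgd : (gl n (2*a)).reverse.getD (n - (tz a + 2)) 0 = (gl n (2*a)).getD (tz a + 1) 0 := by
    rw [reverse_getD _ _ (by omega)]
    congr 1
    omega
  have hst : (gl n (2*a)).reverse.set (n - (tz a + 2)) (1 - (gl n (2*a)).getD (tz a + 1) 0)
      = ((gl n (2*a)).set (tz a + 1) (1 - (gl n (2*a)).getD (tz a + 1) 0)).reverse := by
    rw [reverse_set _ _ _ (by omega)]
    congr 2
    omega
  rw [hgd, hst, GSET n a h1 h2]
  have hr : rings 1 ((2*a : Nat) : Int) = (tz a : Int) + 2 := by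
    rw [rings_tz (2*a) (by omega) 1]
    have htz : tz (2*a) = tz a + 1 := by
      have := tz_even (2*a) (by omega) (by omega)
      have ebb : 2*a/2 = a := by omega
      rwa [ebb] at this
    rw [htz]
    push_cast
    ring
  rw [hr]


theorem ODD (n m : Nat) (h1 : m % 2 = 1) (h2 : m < 2^n) :
    pyFlip ((gl n m).reverse) 0 = ((gl n (m - 1)).reverse, rings 1 ((m : Nat) : Int)) := by
  match n with
  | 0 => exact absurd h1 (by omega)
  | (k+1) =>
    have hm1 : 1 ≤ m := by omega
    have hlen : ((gl (k+1) m).reverse).length = k + 1 := by simp [gl_length]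
    have hgl : (gl (k+1) m).length = k + 1 := gl_length (k+1) m
    unfold pyFlip
    rw [if_pos rfl, hlen]
    have e0 : k + 1 - 1 = k := by omega
    rw [e0]
    have hgd : (gl (k+1) m).reverse.getD k 0 = (gl (k+1) m).getD 0 0 := by
      rw [reverse_getD _ _ (by omega)]
      congr 1
      omega
    have hst : (gl (k+1) m).reverse.set k (1 - (gl (k+1) m).getD 0 0)
        = ((gl (k+1) m).set 0 (1 - (gl (k+1) m).getD 0 0)).reverse := by
      rw [reverse_set _ _ _ (by omega)]
      congr 2
      omega
    rw [hgd, hst]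
    have hrings : rings 1 ((m : Nat) : Int) = 1 := by rw [rings_step 1 m hm1, if_pos h1]
    rw [hrings]
    refine congrArg (fun l : List Int => (l.reverse, (1:Int))) ?_
    -- unfold one gl level on both sides
    show ((((m % 2 + m / 2 % 2) % 2 : Nat) : Int) :: gl k (m / 2)).set 0 _ = gl (k+1) (m-1)
    have e1 : (m-1) / 2 = m / 2 := by omega
    have e2 : (m-1) % 2 = 0 := by omega
    show _ = (((((m-1) % 2 + (m-1) / 2 % 2) % 2 : Nat) : Int) :: gl k ((m-1) / 2))
    rw [e1, e2]
    have hv : (gl (k+1) m).getD 0 0 = ((((m % 2 + m / 2 % 2) % 2 : Nat)) : Int) := by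
      show ((((m % 2 + m / 2 % 2) % 2 : Nat) : Int) :: gl k (m / 2)).getD 0 0 = _
      simp [List.getD]
    rw [hv]
    have hset0 : ∀ (x v : Int) (t : List Int), (x :: t).set 0 v = v :: t := fun _ _ _ => rfl
    rw [hset0]
    have hz : m / 2 % 2 = 0 ∨ m / 2 % 2 = 1 := by omega
    rcases hz with hz | hz <;> rw [h1, hz] <;> norm_num


theorem SIM : ∀ m n, m < 2^n → simLoop ((gl n m).reverse) (pat m) = outL m := by
  intro m
  induction m with
  | zero => intro n _; rfl
  | succ m ih =>
    intro n h2
    have e : m + 1 - 1 = m := by omega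
    have ecast : (((m+1 : Nat)) : Int) = (m : Int) + 1 := by push_cast; ring
    by_cases hodd : (m+1) % 2 = 1
    · rw [pat, if_pos hodd]
      show (pyFlip ((gl n (m+1)).reverse) 0).2 :: simLoop (pyFlip ((gl n (m+1)).reverse) 0).1 (pat m) = _
      rw [ODD n (m+1) hodd h2, e, ih n (by omega)]
      show rings 1 (((m+1 : Nat)) : Int) :: outL m = _
      rw [ecast]
      rfl
    · obtain ⟨a, hab⟩ : ∃ a, m + 1 = 2*a := ⟨(m+1)/2, by omega⟩
      rw [pat, if_neg hodd]
      show (pyFlip ((gl n (m+1)).reverse) 1).2 :: simLoop (pyFlip ((gl n (m+1)).reverse) 1).1 (pat m) = _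
      have hEV := EV n a (by omega) (by omega)
      rw [← hab] at hEV
      rw [e] at hEV
      rw [hEV, ih n (by omega)]
      show rings 1 (((m+1 : Nat)) : Int) :: outL m = _
      rw [ecast]
      rfl

theorem RANGE : ∀ L : Nat, (PySem.List.pyRange (L : Int) 0 (-1)).map (fun k => rings 1 k) = outL L := by
  intro L
  induction L with
  | zero =>
    rw [PySem.List.pyRange_neg_one_eq_nil (by simp)]
    rfl
  | succ L ih =>
    rw [PySem.List.pyRange_neg_one_cons (by push_cast; omega)]
    have e : ((L + 1 : Nat) : Int) - 1 = (L : Int) := by push_cast; ring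
    rw [List.map_cons, e, ih]
    have ecast : (((L+1 : Nat)) : Int) = (L : Int) + 1 := by push_cast; ring
    rw [ecast]
    rfl


-- ===== VERDICT (by name: the statement is the Claim_ definition above) =====
theorem Baguenaudier_spec : Claim_equal_Baguenaudier := by
  unfold Claim_equal_Baguenaudier Spec_Baguenaudier
  intro n _ hpre
  unfold Pre_Baguenaudier at hpre
  set N := n.toNat with hN
  have hN1 : 1 ≤ N := by omega
  -- A side
  have hrepl : List.replicate N 1 = (gl N (Lr N)).reverse := by
    rw [gl_ones N]
    simp
  have hA : Baguenaudier n = outL (Lr N) := by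
    unfold Baguenaudier
    rw [← hN, (B_pat N hN1).1, hrepl, SIM (Lr N) N (Lr_lt N)]
  -- B side
  have hB : Baguenaudier_alt n = outL (Lr N) := by
    unfold Baguenaudier_alt
    have e1 : (n + 1).toNat = N + 1 := by omega
    rw [e1]
    have e2 : ((2:Int) ^ (N+1)) = ((2 ^ (N+1) : Nat) : Int) := by push_cast; ring
    have e3 : PySem.Int.floordiv ((2 ^ (N+1) : Nat) : Int) 3 = ((2 ^ (N+1) / 3 : Nat) : Int) := by
      exact_mod_cast PySem.Int.floordiv_natCast (2 ^ (N+1)) 3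
    have e4 : 2 ^ (N+1) / 3 = Lr N := by
      have := Lr_key N
      omega
    rw [e2, e3, e4, RANGE (Lr N)]
  rw [hA, hB]
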